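-- pv_equiv track=rewrite | github.com/Lukas-Santo-Puglisi/projectEulerAlgorithms | problem692.py | findMinimalAmountToTake
-- ===== SOURCE A (Python) =====
-- from typing import Dict, Tuple
--
-- def isWinning(heapSize: int, prevPlayer:int, mem: Dict[Tuple[int, int], bool])-> bool:
--     if (heapSize, prevPlayer) in mem:
--         return mem[heapSize, prevPlayer]
--     if heapSize == 0:
--         mem[heapSize, prevPlayer] = False
--         return False
--     if heapSize <= 2* prevPlayer:
--         mem[heapSize, prevPlayer] = True
--         return True
--     playerWinning = False
--
--     for player in range(1, 2*prevPlayer+1, 1):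
--         prevWinning = isWinning(heapSize-player, player, mem)
--         if not prevWinning:
--             playerWinning = True
--
--     mem[heapSize, prevPlayer] = playerWinning
--
--     return playerWinning
--
-- def findMinimalAmountToTake(heapSize: int)-> int:
--     minimumAmount = heapSize
--     for player in range(1, heapSize+1):
--         mem: Dict[Tuple[int, int], bool] = {}
--         if not isWinning(heapSize-player, player, mem):
--             minimumAmount = player
--             break
--     return minimumAmount
-- ===== SOURCE B (Python) =====
-- def findMinimalAmountToTake(heapSize: int) -> int:
--     # Zeckendorf greedy: repeatedly remove the largest Fibonacci number <= n;
--     # the last (smallest) term removed is the minimal winning first move.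
--     last = heapSize
--     n = heapSize
--     while n > 0:
--         a, b = 1, 1
--         while b <= n:
--             a, b = b, a + b
--         last = a
--         n -= a
--     return last
-- ===== Notes on version B (the rewrite author's own statement) =====
-- stated objective: faster
-- what changed: Replaces the memoized game-tree search (rebuilt for each candidate first move) by the Zeckendorf greedy: repeatedly subtract the largest Fibonacci number <= n; the last term subtracted (the smallest Zeckendorf part) is the minimal winning first move in Fibonacci Nim.
import Mathlib
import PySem

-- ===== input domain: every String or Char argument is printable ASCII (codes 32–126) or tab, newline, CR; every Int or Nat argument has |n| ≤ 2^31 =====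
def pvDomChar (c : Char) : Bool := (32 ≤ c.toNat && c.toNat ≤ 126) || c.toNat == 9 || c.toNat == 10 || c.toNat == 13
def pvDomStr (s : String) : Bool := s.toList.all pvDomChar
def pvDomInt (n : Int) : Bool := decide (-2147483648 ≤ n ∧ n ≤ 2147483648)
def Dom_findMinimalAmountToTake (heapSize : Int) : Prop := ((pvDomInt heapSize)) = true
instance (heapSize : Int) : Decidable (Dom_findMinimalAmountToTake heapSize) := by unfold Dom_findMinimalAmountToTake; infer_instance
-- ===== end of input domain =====

-- B replaces A's memoized game-tree search by the Zeckendorf greedy (repeatedly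
-- subtract the largest Fibonacci number ≤ n; the last term subtracted is the
-- answer); objective: faster.

-- ===== PORT A =====
-- isWinning(heapSize, prevPlayer, mem); the fuel argument only makes the Python
-- recursion total (heapSize strictly decreases, so heapSize.toNat+1 is enough).
-- The memo dict is only ever read and written by key (never iterated), so a hash
-- map is an exact port of the Python dict here; an association list would make
-- evaluation on small inputs take quadratic time.
def isWinningA : Nat → Int → Int → Std.HashMap (Int × Int) Bool → Bool × Std.HashMap (Int × Int) Bool
  | 0, _, _, mem => (false, mem)
  | fuel+1, heapSize, prevPlayer, mem =>
    match mem[(heapSize, prevPlayer)]? with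
    | some b => (b, mem)
    | none =>
      if heapSize = 0 then (false, mem.insert (heapSize, prevPlayer) false)
      else if heapSize ≤ 2 * prevPlayer then (true, mem.insert (heapSize, prevPlayer) true)
      else
        let r := (PySem.List.pyRange 1 (2 * prevPlayer + 1) 1).foldl
          (fun (st : Bool × Std.HashMap (Int × Int) Bool) player =>
            let res := isWinningA fuel (heapSize - player) player st.2
            (if !res.1 then true else st.1, res.2))
          (false, mem)
        (r.1, r.2.insert (heapSize, prevPlayer) r.1)

-- the 'for player in range(1, heapSize+1)' loop with its break
def loopA (heapSize : Int) : List Int → Int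
  | [] => heapSize
  | player :: rest =>
    if !(isWinningA ((heapSize - player).toNat + 1) (heapSize - player) player (∅ : Std.HashMap (Int × Int) Bool)).1
    then player
    else loopA heapSize rest

def findMinimalAmountToTake (heapSize : Int) : Int :=
  loopA heapSize (PySem.List.pyRange 1 (heapSize + 1) 1)

-- ===== PORT B =====
-- inner 'while b <= n: a, b = b, a + b' loop (fuel n.toNat+1 is enough: b grows each step)
def innerB : Nat → Int → Int → Int → Int
  | 0, a, _, _ => a
  | fuel+1, a, b, n => if b ≤ n then innerB fuel b (a + b) n else a

-- outer 'while n > 0' loop (n decreases by ≥ 1 each iteration)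
def outerB : Nat → Int → Int → Int
  | 0, last, _ => last
  | fuel+1, last, n =>
    if 0 < n then
      let a := innerB (n.toNat + 1) 1 1 n
      outerB fuel a (n - a)
    else last

def findMinimalAmountToTake_alt (heapSize : Int) : Int :=
  outerB (heapSize.toNat + 1) heapSize heapSize

-- ===== PRECONDITION & SPEC =====
-- A's recursion depth grows like heapSize, so beyond the bound below the Python A
-- exceeds CPython's default recursion limit and raises RecursionError in a direct
-- call; Pre_ excludes exactly those inputs.
def Pre_findMinimalAmountToTake (heapSize : Int) : Prop := heapSize ≤ 1000
instance (heapSize : Int) : Decidable (Pre_findMinimalAmountToTake heapSize) := by unfold Pre_findMinimalAmountToTake; infer_instance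
def pvWitness_findMinimalAmountToTake : Int := 155

def Spec_findMinimalAmountToTake (heapSize : Int) (out : Int) : Prop := out = findMinimalAmountToTake_alt heapSize
instance (heapSize : Int) (out : Int) : Decidable (Spec_findMinimalAmountToTake heapSize out) := by unfold Spec_findMinimalAmountToTake; infer_instance

-- ===== CLAIM (what is proved, stated in full; the proofs are below) =====
def Claim_equal_findMinimalAmountToTake : Prop := ∀ (heapSize : Int), Dom_findMinimalAmountToTake heapSize → Pre_findMinimalAmountToTake heapSize → Spec_findMinimalAmountToTake heapSize (findMinimalAmountToTake heapSize)

-- ===== LEMMAS AND PROOFS =====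

-- ---- Fibonacci facts ----
lemma fib_lb : ∀ k : Nat, k + 1 ≤ Nat.fib (k + 2) := by
  intro k
  induction k using Nat.strong_induction_on with
  | _ k ih =>
    match k with
    | 0 => simp
    | 1 => simp [Nat.fib]
    | (k+2) =>
      have h1 := ih k (by omega)
      have h2 := ih (k+1) (by omega)
      have h3 : Nat.fib (k+4) = Nat.fib (k+2) + Nat.fib (k+3) := Nat.fib_add_two
      have e1 : Nat.fib (k + 1 + 2) = Nat.fib (k + 3) := rfl
      have e2 : Nat.fib (k + 2 + 2) = Nat.fib (k + 4) := rfl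
      rw [e1] at h2
      rw [e2]
      omega

lemma fib_uniq {j k n : Nat} (h1 : Nat.fib j ≤ n) (h2 : n < Nat.fib (j+1))
    (h3 : Nat.fib k ≤ n) (h4 : n < Nat.fib (k+1)) : Nat.fib j = Nat.fib k := by
  rcases lt_trichotomy j k with h | h | h
  · have := Nat.fib_mono (show j + 1 ≤ k by omega); omega
  · rw [h]
  · have := Nat.fib_mono (show k + 1 ≤ j by omega); omega

lemma fib_two_le_index {i : Nat} (h : 2 ≤ Nat.fib i) : 3 ≤ i := by
  by_contra hc
  interval_cases i <;> simp_all [Nat.fib]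

-- ---- greatest Fibonacci number ≤ n ----
def gfK (n : Nat) : Nat := Nat.findGreatest (fun k => Nat.fib k ≤ n) (n + 2)
def gfN (n : Nat) : Nat := Nat.fib (gfK n)

lemma gf_char (n : Nat) (hn : 1 ≤ n) :
    2 ≤ gfK n ∧ Nat.fib (gfK n) ≤ n ∧ n < Nat.fib (gfK n + 1) := by
  have h2 : (2 : Nat) ≤ gfK n :=
    Nat.le_findGreatest (by omega) (by simpa [Nat.fib] using hn)
  have hspec : Nat.fib (gfK n) ≤ n :=
    Nat.findGreatest_spec (P := fun k => Nat.fib k ≤ n) (m := 2) (by omega)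
      (by simpa [Nat.fib] using hn)
  have hle : gfK n ≤ n + 1 := by
    by_contra hc
    have h1 : gfK n = n + 2 := le_antisymm (Nat.findGreatest_le _) (by omega)
    have := fib_lb n
    rw [h1] at hspec
    omega
  refine ⟨h2, hspec, ?_⟩
  by_contra hc
  push_neg at hc
  have h9 : gfK n + 1 ≤ gfK n :=
    Nat.le_findGreatest (P := fun k => Nat.fib k ≤ n) (n := n + 2)
      (m := gfK n + 1) (by omega) hc
  omega

lemma gfN_pos (n : Nat) (hn : 1 ≤ n) : 1 ≤ gfN n := by
  have h := (gf_char n hn).1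
  have h2 : 0 < Nat.fib (gfK n) := Nat.fib_pos.mpr (by omega)
  unfold gfN
  omega

lemma gfN_le (n : Nat) (hn : 1 ≤ n) : gfN n ≤ n := (gf_char n hn).2.1

-- smallest term of the Zeckendorf representation (0 for n = 0)
def zedN (n : Nat) : Nat :=
  if n = 0 then 0
  else if n = gfN n then n
  else zedN (n - gfN n)
termination_by n
decreasing_by exact Nat.sub_lt (by omega) (gfN_pos n (by omega))

lemma zedN_def (n : Nat) :
    zedN n = if n = 0 then 0 else if n = gfN n then n else zedN (n - gfN n) := by
  conv_lhs => rw [zedN]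

lemma zed_pos_le : ∀ n : Nat, 1 ≤ n → 1 ≤ zedN n ∧ zedN n ≤ n := by
  intro n
  induction n using Nat.strong_induction_on with
  | _ n ih =>
    intro hn
    rw [zedN_def]
    simp only [show ¬ (n = 0) by omega, if_false]
    by_cases he : n = gfN n
    · simp only [if_pos he]; omega
    · simp only [he, if_false]
      have h1 : 1 ≤ gfN n := gfN_pos n hn
      have h2 : gfN n ≤ n := gfN_le n hn
      have := ih (n - gfN n) (by omega) (by omega)
      omega

-- uniqueness: if fib k ≤ n < fib (k+1) then gfN n = fib k
lemma gfN_eq {k n : Nat} (hn : 1 ≤ n) (h1 : Nat.fib k ≤ n) (h2 : n < Nat.fib (k+1)) :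
    gfN n = Nat.fib k := by
  obtain ⟨_, hb, hc⟩ := gf_char n hn
  exact fib_uniq hb hc h1 h2

lemma zedN_fib {k : Nat} (hk : 2 ≤ k) : zedN (Nat.fib k) = Nat.fib k := by
  have hpos : 0 < Nat.fib k := Nat.fib_pos.mpr (by omega)
  have hlt : Nat.fib k < Nat.fib (k+1) := Nat.fib_lt_fib_succ hk
  have hg : gfN (Nat.fib k) = Nat.fib k := gfN_eq (by omega) (le_refl _) hlt
  rw [zedN_def, if_neg (show ¬ Nat.fib k = 0 by omega), if_pos hg.symm]

-- key step: adding a greedy-dominating Fibonacci term does not change the smallest term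
lemma zed_key {k r : Nat} (hr : 1 ≤ r) (hlt : r < Nat.fib (k+1)) :
    zedN (Nat.fib (k+2) + r) = zedN r := by
  have hfa : Nat.fib (k+2) = Nat.fib k + Nat.fib (k+1) := Nat.fib_add_two
  have hfb : Nat.fib (k+3) = Nat.fib (k+1) + Nat.fib (k+2) := Nat.fib_add_two
  have e1 : Nat.fib (k + 2 + 1) = Nat.fib (k + 3) := rfl
  have hg : gfN (Nat.fib (k+2) + r) = Nat.fib (k+2) := by
    refine gfN_eq ?_ ?_ ?_
    · omega
    · omega
    · rw [e1]; omega
  have hpos : 0 < Nat.fib (k+2) := by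
    have := fib_lb k; omega
  rw [zedN_def,
    if_neg (show ¬ (Nat.fib (k+2) + r = 0) by omega), hg,
    if_neg (show ¬ (Nat.fib (k+2) + r = Nat.fib (k+2)) by omega)]
  congr 1
  omega

-- Lemma C: after taking the smallest Zeckendorf term, the new smallest term more than doubles
lemma zed_remainder : ∀ n : Nat, 1 ≤ n → n ≠ zedN n → 2 * zedN n < zedN (n - zedN n) := by
  intro n
  induction n using Nat.strong_induction_on with
  | _ n ih =>
    intro hn hne
    obtain ⟨hk2, hb, hc⟩ := gf_char n hn
    obtain ⟨j, hj⟩ : ∃ j, gfK n = j + 2 := ⟨gfK n - 2, by omega⟩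
    rw [hj] at hb hc
    have e1 : Nat.fib (j + 2 + 1) = Nat.fib (j + 3) := rfl
    rw [e1] at hc
    obtain ⟨m, hm⟩ : ∃ m, m = n - Nat.fib (j+2) := ⟨_, rfl⟩
    have hfpos : 1 ≤ Nat.fib (j+2) := by have := fib_lb j; omega
    have hfa : Nat.fib (j+3) = Nat.fib (j+1) + Nat.fib (j+2) := Nat.fib_add_two
    have hmlt : m < Nat.fib (j+1) := by omega
    have hgn : gfN n = Nat.fib (j+2) := by rw [gfN, hj]
    have hm1 : 1 ≤ m := by
      rcases Nat.eq_zero_or_pos m with h0 | h1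
      · exfalso
        have hn' : n = Nat.fib (j+2) := by omega
        rw [hn', zedN_fib (by omega)] at hne
        exact hne rfl
      · exact h1
    have hzn : zedN n = zedN m := by
      rw [zedN_def, if_neg (show ¬ n = 0 by omega), hgn,
        if_neg (show ¬ n = Nat.fib (j+2) by omega), hm]
    have hj2 : 2 ≤ j := by
      have h2 : 2 ≤ Nat.fib (j+1) := by omega
      have := fib_two_le_index h2
      omega
    by_cases hmz : m = zedN m
    · -- m itself is its smallest part (hence a Fibonacci number): m = gfN m
      have hmg : m = gfN m := by
        by_contra hneq
        have h1 : 1 ≤ gfN m := gfN_pos m hm1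
        have h2 : gfN m ≤ m := gfN_le m hm1
        have hsub1 : 1 ≤ m - gfN m := by omega
        have := (zed_pos_le (m - gfN m) hsub1).2
        rw [zedN_def, if_neg (show ¬ m = 0 by omega), if_neg hneq] at hmz
        omega
      obtain ⟨i, hi2, hival⟩ : ∃ i, 2 ≤ i ∧ gfN m = Nat.fib i :=
        ⟨gfK m, (gf_char m hm1).1, rfl⟩
      have hmfib : m = Nat.fib i := by rw [hmg, hival]
      have hile : Nat.fib i ≤ Nat.fib j := by
        by_contra hcon
        have hji : j + 1 ≤ i := by
          by_contra hii
          have := Nat.fib_mono (show i ≤ j by omega)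
          omega
        have := Nat.fib_mono hji
        omega
      have hnz : n - zedN n = Nat.fib (j+2) := by
        rw [hzn, ← hmz]; omega
      rw [hnz, zedN_fib (by omega), hzn, ← hmz]
      have hfj2 : Nat.fib (j+2) = Nat.fib j + Nat.fib (j+1) := Nat.fib_add_two
      omega
    · -- recurse on m
      have hIH := ih m (by omega) hm1 hmz
      have hzm_le : zedN m ≤ m := (zed_pos_le m hm1).2
      have hzm_pos : 1 ≤ zedN m := (zed_pos_le m hm1).1
      have hr1 : 1 ≤ m - zedN m := by omega
      have hrlt : m - zedN m < Nat.fib (j+1) := by omega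
      have hnz : n - zedN n = Nat.fib (j+2) + (m - zedN m) := by rw [hzn]; omega
      rw [hnz, zed_key hr1 hrlt, hzn]
      exact hIH

-- Lemma L: taking any x below the smallest Zeckendorf term leaves a position whose
-- smallest term is at most 2x
lemma zed_move : ∀ n x : Nat, 1 ≤ x → x < zedN n → zedN (n - x) ≤ 2 * x := by
  intro n
  induction n using Nat.strong_induction_on with
  | _ n ih =>
    intro x hx hxz
    have hn : 1 ≤ n := by
      rcases Nat.eq_zero_or_pos n with h0 | h1
      · rw [h0, zedN_def] at hxz; simp at hxz
      · exact h1
    obtain ⟨hk2, hb, hc⟩ := gf_char n hn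
    obtain ⟨j, hj⟩ : ∃ j, gfK n = j + 2 := ⟨gfK n - 2, by omega⟩
    rw [hj] at hb hc
    have e1 : Nat.fib (j + 2 + 1) = Nat.fib (j + 3) := rfl
    rw [e1] at hc
    obtain ⟨m, hm⟩ : ∃ m, m = n - Nat.fib (j+2) := ⟨_, rfl⟩
    have hfpos : 1 ≤ Nat.fib (j+2) := by have := fib_lb j; omega
    have hfa : Nat.fib (j+3) = Nat.fib (j+1) + Nat.fib (j+2) := Nat.fib_add_two
    have hmlt : m < Nat.fib (j+1) := by omega
    have hgn : gfN n = Nat.fib (j+2) := by rw [gfN, hj]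
    rcases Nat.eq_zero_or_pos m with hm0 | hm1
    · -- n = fib (j+2), zedN n = n
      have hn' : n = Nat.fib (j+2) := by omega
      have hzn : zedN n = n := by rw [hn', zedN_fib (by omega)]
      rw [hzn] at hxz
      by_cases hxj : Nat.fib j ≤ x
      · -- then n ≤ 3x, and zedN (n-x) ≤ n-x
        have hj1 : 1 ≤ j := by
          by_contra hc0
          have hj0 : j = 0 := by omega
          rw [hj0] at hn'
          norm_num [Nat.fib] at hn'
          omega
        obtain ⟨i, hi⟩ : ∃ i, j = i + 1 := ⟨j - 1, by omega⟩
        have hf1 : Nat.fib (i+2) = Nat.fib i + Nat.fib (i+1) := Nat.fib_add_two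
        have hf2 : Nat.fib (i+3) = Nat.fib (i+1) + Nat.fib (i+2) := Nat.fib_add_two
        have hmono : Nat.fib i ≤ Nat.fib (i+1) := Nat.fib_le_fib_succ
        have hsub1 : 1 ≤ n - x := by omega
        have := (zed_pos_le (n - x) hsub1).2
        have e2 : Nat.fib (i + 1 + 2) = Nat.fib (i + 3) := rfl
        rw [hi] at hn' hxj
        rw [e2] at hn'
        omega
      · -- x < fib j : peel fib (j+1), recurse inside fib j
        push_neg at hxj
        have hfj2 : 2 ≤ Nat.fib j := by omega
        have hj3 : 3 ≤ j := fib_two_le_index hfj2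
        have hfab : Nat.fib (j+2) = Nat.fib j + Nat.fib (j+1) := Nat.fib_add_two
        have hnx : n - x = Nat.fib (j+1) + (Nat.fib j - x) := by omega
        obtain ⟨i, hi⟩ : ∃ i, j = i + 1 := ⟨j - 1, by omega⟩
        have hkey : zedN (n - x) = zedN (Nat.fib j - x) := by
          rw [hnx, hi]
          have e3 : Nat.fib (i + 1 + 1) = Nat.fib (i + 2) := rfl
          rw [e3]
          have hxj' : x < Nat.fib (i + 1) := by rw [← hi]; exact hxj
          have hfp : 1 ≤ Nat.fib (i + 1) := by omega
          exact zed_key (by omega) (by omega)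
        rw [hkey]
        have hfjlt : Nat.fib j < n := by
          have h5 : 1 ≤ Nat.fib (j+1) := by
            have := fib_lb j; omega
          omega
        have hzfj : zedN (Nat.fib j) = Nat.fib j := zedN_fib (by omega)
        exact ih (Nat.fib j) hfjlt x hx (by omega)
    · -- m ≥ 1 : zedN n = zedN m, peel fib (j+2)
      have hzn : zedN n = zedN m := by
        rw [zedN_def, if_neg (show ¬ n = 0 by omega), hgn,
          if_neg (show ¬ n = Nat.fib (j+2) by omega), hm]
      rw [hzn] at hxz
      have hzm_le : zedN m ≤ m := (zed_pos_le m hm1).2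
      have hnx : n - x = Nat.fib (j+2) + (m - x) := by omega
      have hkey : zedN (n - x) = zedN (m - x) := by
        rw [hnx]
        exact zed_key (by omega) (by omega)
      rw [hkey]
      exact ih m (by omega) x hx hxz

-- ---- the game characterisation ----
-- winning predicate: position (h, p) (h sticks left, previous take p) is winning
def winB (h p : Int) : Bool := decide (0 < h ∧ (zedN h.toNat : Int) ≤ 2 * p)

-- memo-dict invariant
def InvA (d : Std.HashMap (Int × Int) Bool) : Prop :=
  ∀ h p b, d[(h, p)]? = some b → 0 ≤ h ∧ 1 ≤ p ∧ b = winB h p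

lemma InvA_empty : InvA (∅ : Std.HashMap (Int × Int) Bool) := by
  intro h p b hb
  simp at hb

lemma InvA_insert {d : Std.HashMap (Int × Int) Bool} (hd : InvA d)
    {h p : Int} {b : Bool} (hh : 0 ≤ h) (hp : 1 ≤ p) (hb : b = winB h p) :
    InvA (d.insert (h, p) b) := by
  intro h' p' b' hb'
  rw [Std.HashMap.getElem?_insert] at hb'
  by_cases he : (h, p) = (h', p')
  · rw [if_pos (by simp [he])] at hb'
    injection hb' with hbb
    injection he with he1 he2
    subst he1; subst he2; subst hbb
    exact ⟨hh, hp, hb⟩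
  · rw [if_neg (by simp [he])] at hb'
    exact hd h' p' b' hb'

-- winning for every take x in [1, 2p] below the smallest Zeckendorf part
lemma winB_move_true {h x : Int} (hx : 1 ≤ x) (hxh : x < h)
    (hxz : x < (zedN h.toNat : Int)) : winB (h - x) x = true := by
  have hxN : x.toNat < zedN h.toNat := by omega
  have hL := zed_move h.toNat x.toNat (by omega) hxN
  have htn : (h - x).toNat = h.toNat - x.toNat := by omega
  simp only [winB, decide_eq_true_eq]
  refine ⟨by omega, ?_⟩
  rw [htn]
  omega

-- losing after taking exactly the smallest Zeckendorf part
lemma winB_move_false {h : Int} (hh : 1 ≤ h) :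
    winB (h - (zedN h.toNat : Int)) (zedN h.toNat : Int) = false := by
  have hz := zed_pos_le h.toNat (by omega)
  by_cases he : h.toNat = zedN h.toNat
  · have h0 : h - (zedN h.toNat : Int) = 0 := by omega
    simp [h0, winB]
  · have hC := zed_remainder h.toNat (by omega) he
    have htn : (h - (zedN h.toNat : Int)).toNat = h.toNat - zedN h.toNat := by omega
    simp only [winB, decide_eq_false_iff_not, not_and, not_le]
    intro h0
    rw [htn]
    omega

-- the any-over-moves value equals the winning predicate (the h > 2p branch)
lemma any_moves (h p : Int) (hp : 1 ≤ p) (hh : 2 * p < h) :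
    (PySem.List.pyRange 1 (2 * p + 1) 1).any (fun x => !winB (h - x) x) = winB h p := by
  have hh1 : 1 ≤ h := by omega
  have hz := zed_pos_le h.toNat (by omega)
  by_cases hzle : (zedN h.toNat : Int) ≤ 2 * p
  · have hw : winB h p = true := by
      simp only [winB, decide_eq_true_eq]
      exact ⟨by omega, hzle⟩
    rw [hw, List.any_eq_true]
    refine ⟨(zedN h.toNat : Int), ?_, ?_⟩
    · rw [PySem.List.mem_pyRange_one]
      constructor <;> omega
    · simp [winB_move_false hh1]
  · have hw : winB h p = false := by
      simp only [winB, decide_eq_false_iff_not, not_and, not_le]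
      intro _
      omega
    rw [hw, List.any_eq_false]
    intro x hxmem
    rw [PySem.List.mem_pyRange_one] at hxmem
    simp [winB_move_true (show 1 ≤ x by omega) (show x < h by omega)
      (show x < (zedN h.toNat : Int) by omega)]

-- the inner fold of port A, given correctness at smaller fuel
lemma foldA_spec (fuel : Nat) (h : Int)
    (IH : ∀ (h' p' : Int) (mem : Std.HashMap (Int × Int) Bool), 0 ≤ h' → 1 ≤ p' →
      h'.toNat < fuel → InvA mem →
      (isWinningA fuel h' p' mem).1 = winB h' p' ∧ InvA (isWinningA fuel h' p' mem).2)
    (hh : 1 ≤ h) (hfuel : h.toNat ≤ fuel) :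
    ∀ (l : List Int) (pw : Bool) (mem : Std.HashMap (Int × Int) Bool),
      (∀ x ∈ l, 1 ≤ x ∧ x < h) → InvA mem →
      (l.foldl
        (fun (st : Bool × Std.HashMap (Int × Int) Bool) player =>
          let res := isWinningA fuel (h - player) player st.2
          (if !res.1 then true else st.1, res.2))
        (pw, mem)).1 = (pw || l.any (fun x => !winB (h - x) x)) ∧
      InvA (l.foldl
        (fun (st : Bool × Std.HashMap (Int × Int) Bool) player =>
          let res := isWinningA fuel (h - player) player st.2
          (if !res.1 then true else st.1, res.2))
        (pw, mem)).2 := by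
  intro l
  induction l with
  | nil => intro pw mem _ hInv; simpa using hInv
  | cons x l ihl =>
    intro pw mem hmem hInv
    have hx := hmem x (List.mem_cons_self ..)
    have hcall := IH (h - x) x mem (by omega) (by omega) (by omega) hInv
    simp only [List.foldl_cons]
    have hrec := ihl (if !(isWinningA fuel (h - x) x mem).1 then true else pw)
      (isWinningA fuel (h - x) x mem).2
      (fun y hy => hmem y (List.mem_cons_of_mem _ hy)) hcall.2
    refine ⟨?_, hrec.2⟩
    rw [hrec.1, hcall.1, List.any_cons]
    cases hw : winB (h - x) x <;> cases pw <;> simp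

-- main correctness of port A's isWinning
lemma isWinningA_correct : ∀ (fuel : Nat) (h p : Int) (mem : Std.HashMap (Int × Int) Bool),
    0 ≤ h → 1 ≤ p → h.toNat < fuel → InvA mem →
    (isWinningA fuel h p mem).1 = winB h p ∧ InvA (isWinningA fuel h p mem).2 := by
  intro fuel
  induction fuel with
  | zero => intro h p mem _ _ hf _; omega
  | succ fuel ih =>
    intro h p mem hh hp hf hInv
    rw [isWinningA]
    cases hget : mem[(h, p)]? with
    | some b =>
      simp only
      have := hInv h p b hget
      exact ⟨this.2.2, hInv⟩
    | none =>
      simp only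
      by_cases h0 : h = 0
      · simp only [if_pos h0]
        subst h0
        exact ⟨by simp [winB], InvA_insert hInv (by omega) hp (by simp [winB])⟩
      · simp only [if_neg h0]
        by_cases h2p : h ≤ 2 * p
        · simp only [if_pos h2p]
          have hz := zed_pos_le h.toNat (by omega)
          have hw : winB h p = true := by
            simp only [winB, decide_eq_true_eq]
            exact ⟨by omega, by omega⟩
          exact ⟨hw.symm, InvA_insert hInv hh hp hw.symm⟩
        · simp only [if_neg h2p]
          push_neg at h2p
          have hfold := foldA_spec fuel h
            (fun h' p' mem' a b c d => ih h' p' mem' a b c d)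
            (by omega) (by omega)
            (PySem.List.pyRange 1 (2 * p + 1) 1) false mem
            (fun x hx => by
              rw [PySem.List.mem_pyRange_one] at hx
              exact ⟨hx.1, by omega⟩) hInv
          have hany := any_moves h p hp h2p
          constructor
          · rw [hfold.1, hany]
            simp
          · refine InvA_insert hfold.2 hh hp ?_
            rw [hfold.1, hany]
            simp

-- A's outer loop returns the smallest Zeckendorf part
lemma loopA_run (h : Int) (hh : 1 ≤ h) :
    ∀ (d : Nat) (a : Int), a = (zedN h.toNat : Int) - d → 1 ≤ a →
      loopA h (PySem.List.pyRange a (h + 1) 1) = (zedN h.toNat : Int) := by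
  have hz := zed_pos_le h.toNat (by omega)
  intro d
  induction d with
  | zero =>
    intro a ha _
    have haz : a = (zedN h.toNat : Int) := by omega
    rw [PySem.List.pyRange_one_cons (by omega), loopA]
    have hcall := isWinningA_correct ((h - a).toNat + 1) (h - a) a (∅ : Std.HashMap (Int × Int) Bool)
      (by omega) (by omega) (by omega) InvA_empty
    rw [hcall.1, haz, winB_move_false hh]
    simp
  | succ d ihd =>
    intro a ha h1
    have halt : a < (zedN h.toNat : Int) := by omega
    rw [PySem.List.pyRange_one_cons (by omega), loopA]
    have hcall := isWinningA_correct ((h - a).toNat + 1) (h - a) a (∅ : Std.HashMap (Int × Int) Bool)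
      (by omega) (by omega) (by omega) InvA_empty
    rw [hcall.1, winB_move_true h1 (by omega) halt]
    simp only [Bool.not_true, Bool.false_eq_true, if_false]
    exact ihd (a + 1) (by omega) (by omega)

-- B's inner loop lands on the Fibonacci interval containing n
lemma innerB_spec : ∀ (fuel i : Nat) (n : Int), 1 ≤ i → (Nat.fib i : Int) ≤ n →
    n < (Nat.fib (i + fuel + 1) : Int) →
    ∃ k, i ≤ k ∧ (Nat.fib k : Int) ≤ n ∧ n < (Nat.fib (k+1) : Int) ∧
      innerB fuel (Nat.fib i) (Nat.fib (i+1)) n = (Nat.fib k : Int) := by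
  intro fuel
  induction fuel with
  | zero =>
    intro i n hi hlo hhi
    exact ⟨i, le_refl _, hlo, by simpa using hhi, rfl⟩
  | succ fuel ih =>
    intro i n hi hlo hhi
    rw [innerB]
    by_cases hble : ((Nat.fib (i+1) : Int)) ≤ n
    · rw [if_pos hble]
      have hfib : ((Nat.fib i : Int)) + (Nat.fib (i+1) : Int) = (Nat.fib (i+2) : Int) := by
        have hf : Nat.fib (i+2) = Nat.fib i + Nat.fib (i+1) := Nat.fib_add_two
        push_cast [hf]; ring
      rw [hfib]
      have hstep := ih (i+1) n (by omega) hble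
        (by have e : i + 1 + fuel + 1 = i + (fuel+1) + 1 := by ring
            rw [e]; exact hhi)
      obtain ⟨k, hk1, hk2, hk3, hk4⟩ := hstep
      exact ⟨k, by omega, hk2, hk3, hk4⟩
    · rw [if_neg hble]
      push_neg at hble
      exact ⟨i, le_refl _, hlo, hble, rfl⟩

-- ... hence computes the greatest Fibonacci number ≤ n
lemma innerB_gf (n : Int) (hn : 1 ≤ n) :
    innerB (n.toNat + 1) 1 1 n = (gfN n.toNat : Int) := by
  have hf1 : (Nat.fib 1 : Int) = 1 := by simp
  have hf2 : (Nat.fib 2 : Int) = 1 := by norm_num [Nat.fib]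
  have hhi : n < (Nat.fib (1 + (n.toNat + 1) + 1) : Int) := by
    have e : 1 + (n.toNat + 1) + 1 = (n.toNat + 1) + 2 := by ring
    rw [e]
    have := fib_lb (n.toNat + 1)
    omega
  obtain ⟨k, hk1, hk2, hk3, hk4⟩ :=
    innerB_spec (n.toNat + 1) 1 n (le_refl _) (by rw [hf1]; omega) hhi
  rw [hf1, hf2] at hk4
  rw [hk4]
  have hg : gfN n.toNat = Nat.fib k := gfN_eq (by omega) (by omega) (by omega)
  rw [hg]

-- B's outer loop computes the smallest Zeckendorf part
lemma outerB_spec : ∀ (fuel : Nat) (n last : Int), 1 ≤ n → n.toNat < fuel →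
    outerB fuel last n = (zedN n.toNat : Int) := by
  intro fuel
  induction fuel with
  | zero => intro n last h1 h2; omega
  | succ fuel ih =>
    intro n last h1 h2
    have hga : innerB (n.toNat + 1) 1 1 n = (gfN n.toNat : Int) := innerB_gf n h1
    have hgle : gfN n.toNat ≤ n.toNat := gfN_le _ (by omega)
    have hgpos : 1 ≤ gfN n.toNat := gfN_pos _ (by omega)
    rw [outerB]
    rw [if_pos (show (0:Int) < n by omega)]
    simp only [hga]
    by_cases he : n = (gfN n.toNat : Int)
    · have h0 : n - (gfN n.toNat : Int) = 0 := by omega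
      rw [h0]
      have hout : ∀ f : Nat, outerB f (gfN n.toNat : Int) 0 = (gfN n.toNat : Int) := by
        intro f; cases f <;> simp [outerB]
      rw [hout]
      rw [zedN_def, if_neg (show ¬ n.toNat = 0 by omega),
        if_pos (show n.toNat = gfN n.toNat by omega)]
      omega
    · have h1' : 1 ≤ n - (gfN n.toNat : Int) := by omega
      rw [ih (n - (gfN n.toNat : Int)) (gfN n.toNat : Int) h1' (by omega)]
      have htn : (n - (gfN n.toNat : Int)).toNat = n.toNat - gfN n.toNat := by omega
      rw [htn]
      rw [zedN_def (n := n.toNat), if_neg (show ¬ n.toNat = 0 by omega),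
        if_neg (show ¬ n.toNat = gfN n.toNat by omega)]

-- ===== VERDICT (by name: the statement is the Claim_ definition above) =====
theorem findMinimalAmountToTake_spec : Claim_equal_findMinimalAmountToTake := by
  intro h _ _
  unfold Spec_findMinimalAmountToTake findMinimalAmountToTake findMinimalAmountToTake_alt
  by_cases hh : 1 ≤ h
  · have hz := zed_pos_le h.toNat (by omega)
    rw [outerB_spec (h.toNat + 1) h h hh (by omega)]
    exact loopA_run h hh (zedN h.toNat - 1) 1 (by omega) (by omega)
  · have ht : h.toNat = 0 := by omega
    rw [PySem.List.pyRange_one_eq_nil (by omega), loopA, ht]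
    simp [outerB, show ¬ (0:Int) < h by omega]
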